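-- pv_equiv track=rewrite | github.com/raeez/chiral-bar-cobar | compute/lib/mc2_cyclic_linf.py | _orbit_partition_from_action_maps
-- ===== SOURCE A (Python) =====
-- from typing import Dict, Iterable, Mapping, Tuple
--
-- def _orbit_partition_from_action_maps(
--     labels: Tuple[str, ...],
--     action_maps: Tuple[Mapping[str, str], ...],
-- ) -> Tuple[Tuple[str, ...], ...]:
--     """Compute orbit partition for a finite action given as label maps."""
--     if not action_maps:
--         return tuple((label,) for label in labels)
--
--     remaining = set(labels)
--     orbits: list[Tuple[str, ...]] = []
--     while remaining:
--         start = next(label for label in labels if label in remaining)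
--         orbit = {start}
--         frontier = [start]
--         while frontier:
--             current = frontier.pop()
--             for action in action_maps:
--                 nxt = action.get(current, current)
--                 if nxt not in orbit:
--                     orbit.add(nxt)
--                     frontier.append(nxt)
--         for label in orbit:
--             remaining.discard(label)
--         ordered_orbit = tuple(label for label in labels if label in orbit)
--         orbits.append(ordered_orbit)
--     return tuple(orbits)
-- ===== SOURCE B (Python) =====
-- def _orbit_partition_from_action_maps(labels, action_maps):
--     """Orbit partition via a precomputed adjacency index and one forward scan.
--
--     Instead of probing every action map for every visited node, build one
--     adjacency dict (node -> list of images) up front, then scan the labels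
--     once, running a stack-based closure over the adjacency index for each
--     label not yet covered.
--     """
--     if not action_maps:
--         return tuple((label,) for label in labels)
--
--     adj = {}
--     for m in action_maps:
--         for k, v in m.items():
--             adj.setdefault(k, []).append(v)
--
--     seen = set()
--     orbits = []
--     for start in labels:
--         if start in seen:
--             continue
--         closure = {start}
--         stack = [start]
--         while stack:
--             x = stack.pop()
--             for y in adj.get(x, ()):
--                 if y not in closure:
--                     closure.add(y)
--                     stack.append(y)
--         seen.update(closure)
--         orbits.append(tuple(l for l in labels if l in closure))
--     return tuple(orbits)
-- ===== Notes on version B (the rewrite author's own statement) =====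
-- stated objective: faster
-- what changed: B precomputes one adjacency index (node -> images across all maps) so each visited node is expanded by a single dict lookup instead of probing every action map, and replaces A's while-remaining loop (which rescans labels with next() each orbit) by a single forward scan over labels with a 'seen' set.
import Mathlib
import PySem

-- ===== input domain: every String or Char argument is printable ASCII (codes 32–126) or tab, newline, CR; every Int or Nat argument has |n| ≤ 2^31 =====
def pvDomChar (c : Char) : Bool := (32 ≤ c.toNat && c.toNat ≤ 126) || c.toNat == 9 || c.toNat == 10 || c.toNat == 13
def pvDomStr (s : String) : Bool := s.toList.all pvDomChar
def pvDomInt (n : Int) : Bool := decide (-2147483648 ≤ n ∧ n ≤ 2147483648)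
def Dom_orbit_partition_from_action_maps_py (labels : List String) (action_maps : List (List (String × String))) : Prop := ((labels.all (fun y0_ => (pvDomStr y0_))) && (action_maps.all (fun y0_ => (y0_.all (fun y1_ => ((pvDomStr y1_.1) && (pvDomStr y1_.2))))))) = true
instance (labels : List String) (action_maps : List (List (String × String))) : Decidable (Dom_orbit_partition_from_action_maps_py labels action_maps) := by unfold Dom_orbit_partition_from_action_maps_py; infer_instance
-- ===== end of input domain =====

-- ===== PORT A =====
-- B changes: one adjacency index replaces the per-node scan over all action maps, and a single
-- forward scan over labels with a 'seen' set replaces the while-remaining loop with its repeated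
-- next() scan.  (This header describes B; port A below is A's code verbatim.)

-- shared leaf helper: a safe fuel bound for the closure while-loops of both ports
-- (each loop iteration pops one node; total pops = |closure| <= 1 + total number of map entries)
def pvClosureFuel (action_maps : List (List (String × String))) : Nat :=
  (action_maps.map List.length).sum + 2

-- A's inner 'while frontier' loop: pop a node, apply every action map to it (get with default)
def pvABFS (ams : List (List (String × String))) :
    Nat → PySem.Set String → List String → PySem.Set String
  | 0, orbit, _ => orbit
  | _ + 1, orbit, [] => orbit
  | fuel + 1, orbit, current :: frontier =>
      let st := ams.foldl (fun st m =>
          let nxt := (PySem.Dict.ofList m).getD current current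
          if PySem.Set.contains st.1 nxt then st
          else (PySem.Set.add st.1 nxt, nxt :: st.2))
        (orbit, ([] : List String))
      pvABFS ams fuel st.1 (st.2 ++ frontier)

-- A's outer 'while remaining' loop (fuel-guarded; the 'next(...)' scan is labels.find?)
def pvAOuter (labels : List String) (ams : List (List (String × String))) :
    Nat → PySem.Set String → List (List String) → List (List String)
  | 0, _, acc => acc
  | fuel + 1, remaining, acc =>
      if remaining.isEmpty then acc
      else
        match labels.find? (fun l => PySem.Set.contains remaining l) with
        | none => acc   -- unreachable: remaining is always a nonempty subset of labels here
        | some start =>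
            let orbit := pvABFS ams (pvClosureFuel ams)
              (PySem.Set.add PySem.Set.empty start) [start]
            let remaining' := orbit.foldl (fun r l => PySem.Set.discard r l) remaining
            pvAOuter labels ams fuel remaining'
              (acc ++ [labels.filter (fun l => PySem.Set.contains orbit l)])

def orbit_partition_from_action_maps_py (labels : List String) (action_maps : List (List (String × String))) : List (List String) :=
  if action_maps.isEmpty then labels.map (fun l => [l])
  else pvAOuter labels action_maps (labels.length + 1) (PySem.Set.ofList labels) []

-- ===== PORT B =====
-- adj = {}; for m in action_maps: for k, v in m.items(): adj.setdefault(k, []).append(v)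
def pvBuildAdj (ams : List (List (String × String))) : PySem.Dict String (List String) :=
  ams.foldl (fun adj m =>
      (PySem.Dict.ofList m).items.foldl
        (fun adj p => adj.modify p.1 [] (fun vs => vs ++ [p.2])) adj)
    PySem.Dict.empty

-- B's 'while stack' closure loop over the adjacency index
def pvBBFS (adj : PySem.Dict String (List String)) :
    Nat → PySem.Set String → List String → PySem.Set String
  | 0, cl, _ => cl
  | _ + 1, cl, [] => cl
  | fuel + 1, cl, x :: stack =>
      let st := (adj.getD x []).foldl (fun st y =>
          if PySem.Set.contains st.1 y then st
          else (PySem.Set.add st.1 y, y :: st.2))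
        (cl, ([] : List String))
      pvBBFS adj fuel st.1 (st.2 ++ stack)

-- B's single 'for start in labels' scan with the 'seen' set
def pvBOuter (labels : List String) (ams : List (List (String × String)))
    (adj : PySem.Dict String (List String)) :
    List String → PySem.Set String → List (List String) → List (List String)
  | [], _, acc => acc
  | l :: rest, seen, acc =>
      if PySem.Set.contains seen l then pvBOuter labels ams adj rest seen acc
      else
        let cl := pvBBFS adj (pvClosureFuel ams) (PySem.Set.add PySem.Set.empty l) [l]
        pvBOuter labels ams adj rest (PySem.Set.update seen cl)
          (acc ++ [labels.filter (fun x => PySem.Set.contains cl x)])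

def orbit_partition_from_action_maps_py_alt (labels : List String) (action_maps : List (List (String × String))) : List (List String) :=
  if action_maps.isEmpty then labels.map (fun l => [l])
  else pvBOuter labels action_maps (pvBuildAdj action_maps) labels PySem.Set.empty []

-- ===== PRECONDITION & SPEC =====
def Spec_orbit_partition_from_action_maps_py (labels : List String) (action_maps : List (List (String × String))) (out : List (List String)) : Prop := out = orbit_partition_from_action_maps_py_alt labels action_maps
instance (labels : List String) (action_maps : List (List (String × String))) (out : List (List String)) : Decidable (Spec_orbit_partition_from_action_maps_py labels action_maps out) := by unfold Spec_orbit_partition_from_action_maps_py; infer_instance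

-- ===== CLAIM (what is proved, stated in full; the proofs are below) =====
def Claim_equal_orbit_partition_from_action_maps_py : Prop := ∀ (labels : List String) (action_maps : List (List (String × String))), Dom_orbit_partition_from_action_maps_py labels action_maps → Spec_orbit_partition_from_action_maps_py labels action_maps (orbit_partition_from_action_maps_py labels action_maps)

-- ===== LEMMAS AND PROOFS =====

-- the list of images of x under the action maps, in map order (proof-only helper)
def pvSucc (ams : List (List (String × String))) (x : String) : List String :=
  ams.flatMap (fun m => ((PySem.Dict.ofList m).get? x).elim [] (fun v => [v]))

-- in a dict (unique keys), filtering the items by key x yields exactly the lookup at x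
lemma pv_filter_items (d : PySem.Dict String String) (x : String) (h : d.keys.Nodup) :
    (d.items.filter (fun p => p.1 == x)).map Prod.snd = (d.get? x).elim [] (fun v => [v]) := by
  obtain ⟨l⟩ := d
  induction l with
  | nil => simp [PySem.Dict.get?]
  | cons p tl ih =>
    obtain ⟨k, v⟩ := p
    rw [PySem.Dict.get?_mk_cons]
    by_cases hk : k = x
    · subst hk
      have h2 : (∀ (y : String), (k, y) ∉ tl) ∧ (tl.map Prod.fst).Nodup := by
        simpa [PySem.Dict.keys] using h
      have hfil : tl.filter (fun p => p.1 == k) = [] := by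
        apply List.filter_eq_nil_iff.mpr
        intro p hp
        simp only [beq_iff_eq]
        intro hpk
        exact h2.1 p.2 (by rw [← hpk]; simpa using hp)
      simp [hfil]
    · have h' : (PySem.Dict.mk tl).keys.Nodup := by
        simp [PySem.Dict.keys] at h ⊢; exact h.2
      simp [hk, ih h']

-- the adjacency index built by B looks up to exactly the images list pvSucc
lemma pv_adj_getD (ams : List (List (String × String))) (x : String) :
    ∀ (adj0 : PySem.Dict String (List String)),
      (ams.foldl (fun adj m =>
          (PySem.Dict.ofList m).items.foldl
            (fun adj p => adj.modify p.1 [] (fun vs => vs ++ [p.2])) adj) adj0).getD x []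
        = adj0.getD x [] ++ pvSucc ams x := by
  induction ams with
  | nil => intro adj0; simp [pvSucc]
  | cons m tl ih =>
    intro adj0
    simp only [List.foldl_cons]
    rw [ih, PySem.Dict.getD_foldl_modify_append,
      pv_filter_items _ _ (PySem.Dict.nodup_keys_ofList m)]
    simp [pvSucc]

lemma pv_buildAdj_getD (ams : List (List (String × String))) (x : String) :
    (pvBuildAdj ams).getD x [] = pvSucc ams x := by
  have := pv_adj_getD ams x PySem.Dict.empty
  simpa [pvBuildAdj] using this

-- A's pass over all action maps at a visited node equals B's pass over the adjacency list
lemma pv_inner (current : String) :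
    ∀ (ams : List (List (String × String))) (st : PySem.Set String × List String),
      current ∈ st.1 →
      ams.foldl (fun st m =>
          let nxt := (PySem.Dict.ofList m).getD current current
          if PySem.Set.contains st.1 nxt then st
          else (PySem.Set.add st.1 nxt, nxt :: st.2)) st
        = (pvSucc ams current).foldl (fun st y =>
            if PySem.Set.contains st.1 y then st
            else (PySem.Set.add st.1 y, y :: st.2)) st := by
  intro ams
  induction ams with
  | nil => intro st _; simp [pvSucc]
  | cons m tl ih =>
    intro st hcur
    simp only [List.foldl_cons, pvSucc, List.flatMap_cons, List.foldl_append]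
    rcases hg : (PySem.Dict.ofList m).get? current with _ | v
    · have hd : (PySem.Dict.ofList m).getD current current = current :=
        PySem.Dict.getD_of_get?_eq_none _ current hg
      have hc : PySem.Set.contains st.1 current = true :=
        (PySem.Set.contains_iff _ _).mpr hcur
      simp only [hd, hc, if_pos]
      simpa [pvSucc] using ih st hcur
    · have hd : (PySem.Dict.ofList m).getD current current = v :=
        PySem.Dict.getD_of_get?_eq_some _ current hg
      simp only [hd, Option.elim, List.foldl_cons, List.foldl_nil]
      have hcur' : current ∈ (if PySem.Set.contains st.1 v then st
          else (PySem.Set.add st.1 v, v :: st.2)).1 := by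
        split
        · exact hcur
        · exact (PySem.Set.mem_add _ _ _).mpr (Or.inl hcur)
      simpa [pvSucc] using ih _ hcur'

-- invariants of the common push step: the set only grows, and pushed nodes are in the set
lemma pv_step_inv :
    ∀ (ys : List String) (st : PySem.Set String × List String),
      (∀ z ∈ st.2, z ∈ st.1) →
      (∀ z ∈ st.1, z ∈ (ys.foldl (fun st y =>
          if PySem.Set.contains st.1 y then st
          else (PySem.Set.add st.1 y, y :: st.2)) st).1) ∧
      (∀ z ∈ (ys.foldl (fun st y =>
          if PySem.Set.contains st.1 y then st
          else (PySem.Set.add st.1 y, y :: st.2)) st).2,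
        z ∈ (ys.foldl (fun st y =>
          if PySem.Set.contains st.1 y then st
          else (PySem.Set.add st.1 y, y :: st.2)) st).1) := by
  intro ys
  induction ys with
  | nil => intro st h; exact ⟨fun z hz => hz, h⟩
  | cons y tl ih =>
    intro st h
    simp only [List.foldl_cons]
    split
    · exact ih st h
    · next hny =>
      have h' : ∀ z ∈ (PySem.Set.add st.1 y, y :: st.2).2,
          z ∈ (PySem.Set.add st.1 y, y :: st.2).1 := by
        intro z hz
        rcases hz with _ | hz
        · exact (PySem.Set.mem_add _ _ _).mpr (Or.inr rfl)
        · exact (PySem.Set.mem_add _ _ _).mpr (Or.inl (h z (by assumption)))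
      obtain ⟨h1, h2⟩ := ih _ h'
      exact ⟨fun z hz => h1 z ((PySem.Set.mem_add _ _ _).mpr (Or.inl hz)), h2⟩

-- the two closure loops run in lockstep
lemma pv_bfs_eq (ams : List (List (String × String))) :
    ∀ (fuel : Nat) (orbit : PySem.Set String) (frontier : List String),
      (∀ y ∈ frontier, y ∈ orbit) →
      pvABFS ams fuel orbit frontier = pvBBFS (pvBuildAdj ams) fuel orbit frontier := by
  intro fuel
  induction fuel with
  | zero => intro orbit frontier _; rfl
  | succ f ih =>
    intro orbit frontier hinv
    cases frontier with
    | nil => rfl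
    | cons current rest =>
      simp only [pvABFS, pvBBFS, pv_buildAdj_getD,
        pv_inner current ams (orbit, []) (hinv current (by simp))]
      obtain ⟨h1, h2⟩ := pv_step_inv (pvSucc ams current) (orbit, ([] : List String))
        (by intro z hz; simp at hz)
      apply ih
      intro y hy
      rcases List.mem_append.mp hy with hy | hy
      · exact h2 y hy
      · exact h1 y (hinv y (List.mem_cons_of_mem _ hy))

lemma pv_bfs_mono (adj : PySem.Dict String (List String)) :
    ∀ (fuel : Nat) (cl : PySem.Set String) (stack : List String) (z : String),
      z ∈ cl → z ∈ pvBBFS adj fuel cl stack := by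
  intro fuel
  induction fuel with
  | zero => intro cl stack z hz; exact hz
  | succ f ih =>
    intro cl stack z hz
    cases stack with
    | nil => exact hz
    | cons x rest =>
      simp only [pvBBFS]
      obtain ⟨h1, _⟩ := pv_step_inv (adj.getD x []) (cl, ([] : List String))
        (by intro w hw; simp at hw)
      exact ih _ _ z (h1 z hz)

lemma pv_discard_fold (l : List String) :
    ∀ (s : PySem.Set String) (x : String),
      x ∈ l.foldl (fun r y => PySem.Set.discard r y) s ↔ x ∈ s ∧ x ∉ l := by
  induction l with
  | nil => simp
  | cons y tl ih =>
    intro s x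
    simp only [List.foldl_cons, ih, PySem.Set.mem_discard, List.mem_cons]
    constructor
    · rintro ⟨⟨hs, hne⟩, hnt⟩; exact ⟨hs, by rintro (h | h) <;> [exact hne h; exact hnt h]⟩
    · rintro ⟨hs, hn⟩; exact ⟨⟨hs, fun h => hn (Or.inl h)⟩, fun h => hn (Or.inr h)⟩

-- main loop correspondence: A's while-remaining loop equals B's scan over the label suffix
lemma pv_outer (labels : List String) (ams : List (List (String × String))) :
    ∀ (suffix pre : List String) (seen remaining : PySem.Set String)
      (acc : List (List String)) (fuel : Nat),
      labels = pre ++ suffix →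
      (∀ l ∈ pre, l ∈ seen) →
      (∀ x, x ∈ remaining ↔ (x ∈ labels ∧ x ∉ seen)) →
      suffix.length + 1 ≤ fuel →
      pvAOuter labels ams fuel remaining acc
        = pvBOuter labels ams (pvBuildAdj ams) suffix seen acc := by
  intro suffix
  induction suffix with
  | nil =>
    intro pre seen remaining acc fuel hlab hpre hrem hfuel
    obtain ⟨f, rfl⟩ : ∃ f, fuel = f + 1 := ⟨fuel - 1, by omega⟩
    have hempty : remaining = [] := by
      apply List.eq_nil_iff_forall_not_mem.mpr
      intro x hx
      obtain ⟨hxl, hxs⟩ := (hrem x).mp hx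
      exact hxs (hpre x (by simpa [hlab] using hxl))
    simp [pvAOuter, pvBOuter, hempty]
  | cons l rest ih =>
    intro pre seen remaining acc fuel hlab hpre hrem hfuel
    obtain ⟨f, rfl⟩ : ∃ f, fuel = f + 1 := ⟨fuel - 1, by omega⟩
    by_cases hl : l ∈ seen
    · have hc : PySem.Set.contains seen l = true := (PySem.Set.contains_iff _ _).mpr hl
      simp only [pvBOuter, hc, if_true]
      apply ih (pre ++ [l]) seen remaining acc (f + 1)
      · simp [hlab]
      · intro a ha
        rcases List.mem_append.mp ha with ha | ha
        · exact hpre a ha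
        · simpa using (List.mem_singleton.mp ha ▸ hl)
      · exact hrem
      · simp at hfuel ⊢; omega
    · have hc : PySem.Set.contains seen l = false := by
        rcases h : PySem.Set.contains seen l with _ | _
        · rfl
        · exact absurd ((PySem.Set.contains_iff _ _).mp h) hl
      have hlmem : l ∈ remaining :=
        (hrem l).mpr ⟨by simp [hlab], hl⟩
      have hne : remaining.isEmpty = false := by
        cases remaining with
        | nil => simp at hlmem
        | cons a b => rfl
      have hfind : labels.find? (fun x => PySem.Set.contains remaining x) = some l := by
        rw [hlab, List.find?_append]
        have hnone : pre.find? (fun x => PySem.Set.contains remaining x) = none := by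
          apply List.find?_eq_none.mpr
          intro x hx
          have : x ∉ remaining := fun hr => ((hrem x).mp hr).2 (hpre x hx)
          simpa [PySem.Set.contains_iff] using this
        rw [hnone]
        simp [hlmem]
      have hbfs : pvABFS ams (pvClosureFuel ams)
            (PySem.Set.add PySem.Set.empty l) [l]
          = pvBBFS (pvBuildAdj ams) (pvClosureFuel ams)
            (PySem.Set.add PySem.Set.empty l) [l] := by
        apply pv_bfs_eq
        intro y hy
        simp at hy
        subst hy
        exact (PySem.Set.mem_add _ _ _).mpr (Or.inr rfl)
      simp only [pvAOuter, pvBOuter, hne, hfind, hc, Bool.false_eq_true, if_false, hbfs]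
      set cl := pvBBFS (pvBuildAdj ams) (pvClosureFuel ams)
        (PySem.Set.add PySem.Set.empty l) [l] with hcl
      have hlcl : l ∈ cl :=
        pv_bfs_mono _ _ _ _ l ((PySem.Set.mem_add _ _ _).mpr (Or.inr rfl))
      apply ih (pre ++ [l]) (PySem.Set.update seen cl) _ _ f
      · simp [hlab]
      · intro a ha
        rcases List.mem_append.mp ha with ha | ha
        · exact (PySem.Set.mem_update _ _ _).mpr (Or.inl (hpre a ha))
        · exact (PySem.Set.mem_update _ _ _).mpr
            (Or.inr (List.mem_singleton.mp ha ▸ hlcl))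
      · intro x
        rw [pv_discard_fold]
        rw [hrem x]
        rw [PySem.Set.mem_update]
        constructor
        · rintro ⟨⟨hx1, hx2⟩, hx3⟩
          exact ⟨hx1, by rintro (h | h) <;> [exact hx2 h; exact hx3 h]⟩
        · rintro ⟨hx1, hx2⟩
          exact ⟨⟨hx1, fun h => hx2 (Or.inl h)⟩, fun h => hx2 (Or.inr h)⟩
      · simp at hfuel ⊢; omega

-- ===== VERDICT (by name: the statement is the Claim_ definition above) =====
theorem orbit_partition_from_action_maps_py_spec : Claim_equal_orbit_partition_from_action_maps_py := by
  intro labels ams _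
  unfold Spec_orbit_partition_from_action_maps_py
  unfold orbit_partition_from_action_maps_py orbit_partition_from_action_maps_py_alt
  by_cases h : ams.isEmpty
  · simp [h]
  · simp only [h]
    exact pv_outer labels ams labels [] PySem.Set.empty (PySem.Set.ofList labels) [] (labels.length + 1)
      rfl (by simp) (by intro x; simp [PySem.Set.mem_ofList, PySem.Set.empty]) (by omega)
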